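-- pv_equiv track=rewrite | github.com/pandas-dev/pandas | pandas/io/formats/common.py | get_level_lengths
-- ===== SOURCE A (Python) =====
-- def get_level_lengths(levels, sentinel=''):
--     """For each index in each level the function returns lengths of indexes.
--
--     Parameters
--     ----------
--     levels : list of lists
--         List of values on for level.
--     sentinel : string, optional
--         Value which states that no new index starts on there.
--
--     Returns
--     ----------
--     Returns list of maps. For each level returns map of indexes (key is index
--     in row and value is length of index).
--     """
--     if len(levels) == 0:
--         return []
--
--     control = [True for x in levels[0]]
--
--     result = []
--     for level in levels:
--         last_index = 0
--
--         lengths = {}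
--         for i, key in enumerate(level):
--             if control[i] and key == sentinel:
--                 pass
--             else:
--                 control[i] = False
--                 lengths[last_index] = i - last_index
--                 last_index = i
--
--         lengths[last_index] = len(level) - last_index
--
--         result.append(lengths)
--
--     return result
-- ===== SOURCE B (Python) =====
-- def get_level_lengths(levels, sentinel=''):
--     if len(levels) == 0:
--         return []
--     result = []
--     for li, level in enumerate(levels):
--         starts = [0] + [i for i in range(1, len(level))
--                         if any(i < len(levels[k]) and levels[k][i] != sentinel
--                                for k in range(li + 1))]
--         ends = starts[1:] + [len(level)]
--         result.append({b: e - b for b, e in zip(starts, ends)})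
--     return result
-- ===== Notes on version B (the rewrite author's own statement) =====
-- stated objective: alternative
-- what changed: B eliminates A's shared mutable control mask and running last_index/dict accumulator entirely: for each level it computes the group-start positions declaratively (index i starts a group iff some level up to the current one has a non-sentinel in column i) and emits the lengths as gaps between consecutive starts.
import Mathlib
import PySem

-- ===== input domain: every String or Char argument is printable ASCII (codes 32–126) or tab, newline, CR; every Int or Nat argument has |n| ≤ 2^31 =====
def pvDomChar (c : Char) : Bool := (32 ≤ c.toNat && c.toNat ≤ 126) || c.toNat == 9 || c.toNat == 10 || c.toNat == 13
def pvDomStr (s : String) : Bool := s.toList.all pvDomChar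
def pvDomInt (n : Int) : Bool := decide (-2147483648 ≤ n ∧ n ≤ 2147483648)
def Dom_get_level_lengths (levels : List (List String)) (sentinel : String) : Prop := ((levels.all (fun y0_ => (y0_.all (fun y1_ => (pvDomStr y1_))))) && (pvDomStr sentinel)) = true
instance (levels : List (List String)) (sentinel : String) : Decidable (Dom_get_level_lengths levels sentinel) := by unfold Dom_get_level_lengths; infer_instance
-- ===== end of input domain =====

-- B drops A's shared mutable control mask and running last_index/dict accumulator: it computes
-- each level's group-start positions declaratively (i starts a group iff some level up to the
-- current one has a non-sentinel in column i) and emits lengths as gaps between consecutive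
-- starts (objective: alternative decomposition; B is stateless but quadratic in level count).

-- ===== PORT A =====
-- control[i]: Python raises IndexError out of range; ported with default `false`
-- (Pre_ below restricts to inputs where every access is in range, = where A returns).
def glStepA (sentinel : String) (st : List Bool × Int × PySem.Dict Int Int) (p : Int × String) :
    List Bool × Int × PySem.Dict Int Int :=
  if PySem.List.pyGetD st.1 p.1 false && (p.2 == sentinel) then st
  else (st.1.set p.1.toNat false, p.1, st.2.2.insert st.2.1 (p.1 - st.2.1))

def glLevelA (sentinel : String) (acc : List Bool × List (List (Int × Int))) (level : List String) :
    List Bool × List (List (Int × Int)) :=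
  let st := (PySem.List.enumerate level).foldl (glStepA sentinel) (acc.1, (0 : Int), PySem.Dict.empty)
  (st.1, acc.2 ++ [(st.2.2.insert st.2.1 ((level.length : Int) - st.2.1)).items])

def get_level_lengths (levels : List (List String)) (sentinel : String) : List (List (Int × Int)) :=
  if levels.length == 0 then []
  else (levels.foldl (glLevelA sentinel) ((levels.headD []).map (fun _ => true), [])).2

-- ===== PORT B =====
-- `any(i < len(levels[k]) and levels[k][i] != sentinel for k in range(li + 1))`
-- (k ranges over valid level indices; levels[k][i] is only read under the i < len guard,
-- matching Python's short-circuit `and`, so the pyGetD defaults are never the result).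
def bBrk (levels : List (List String)) (sentinel : String) (li i : Int) : Bool :=
  (PySem.List.pyRange 0 (li + 1) 1).any (fun k =>
    decide (i < ((PySem.List.pyGetD levels k []).length : Int)) &&
      !(PySem.List.pyGetD (PySem.List.pyGetD levels k []) i "" == sentinel))

-- starts = [0] + [i for i in range(1, len(level)) if any(...)]
def bStarts (levels : List (List String)) (sentinel : String) (li : Int) (level : List String) :
    List Int :=
  0 :: (PySem.List.pyRange 1 (level.length : Int) 1).filter (bBrk levels sentinel li)

-- the dict comprehension {b: e - b for b, e in zip(starts, starts[1:] + [len(level)])}: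
-- its keys (the starts) are strictly increasing, hence distinct, so its items in insertion
-- order are exactly this zip — exact on that domain.
def bGaps (starts : List Int) (L : Int) : List (Int × Int) :=
  (starts.zip (starts.drop 1 ++ [L])).map (fun p => (p.1, p.2 - p.1))

def get_level_lengths_alt (levels : List (List String)) (sentinel : String) :
    List (List (Int × Int)) :=
  if levels.length == 0 then []
  else (PySem.List.enumerate levels).map
    (fun p => bGaps (bStarts levels sentinel p.1 p.2) ((p.2.length : Int)))

-- ===== PRECONDITION & SPEC =====
-- Pre_ : exactly the inputs where Python A returns — a level longer than levels[0]
-- makes A's `control[i]` raise IndexError.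
def Pre_get_level_lengths (levels : List (List String)) (sentinel : String) : Prop :=
  ∀ l ∈ levels, l.length ≤ (levels.headD []).length
instance (levels : List (List String)) (sentinel : String) : Decidable (Pre_get_level_lengths levels sentinel) := by unfold Pre_get_level_lengths; infer_instance

def pvWitness_get_level_lengths : List (List String) × String := ([["a", ""], ["b", "b"]], "")

def Spec_get_level_lengths (levels : List (List String)) (sentinel : String) (out : List (List (Int × Int))) : Prop := out = get_level_lengths_alt levels sentinel
instance (levels : List (List String)) (sentinel : String) (out : List (List (Int × Int))) : Decidable (Spec_get_level_lengths levels sentinel out) := by unfold Spec_get_level_lengths; infer_instance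

-- ===== CLAIM (what is proved, stated in full; the proofs are below) =====
def Claim_equal_get_level_lengths : Prop := ∀ (levels : List (List String)) (sentinel : String), Dom_get_level_lengths levels sentinel → Pre_get_level_lengths levels sentinel → Spec_get_level_lengths levels sentinel (get_level_lengths levels sentinel)


-- ===== LEMMAS AND PROOFS =====

-- "column i breaks at some level with index < m" — the pure predicate A's control mask tracks
def brkCond (levels : List (List String)) (sentinel : String) (i k : Int) : Bool :=
  decide (i < ((PySem.List.pyGetD levels k []).length : Int)) &&
    !(PySem.List.pyGetD (PySem.List.pyGetD levels k []) i "" == sentinel)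

def brkLt (levels : List (List String)) (sentinel : String) (m i : Int) : Bool :=
  (PySem.List.pyRange 0 m 1).any (brkCond levels sentinel i)

lemma bBrk_eq (levels : List (List String)) (sentinel : String) (li i : Int) :
    bBrk levels sentinel li i = brkLt levels sentinel (li + 1) i := rfl

lemma brkLt_zero (levels : List (List String)) (sentinel : String) (i : Int) :
    brkLt levels sentinel 0 i = false := by
  simp [brkLt, PySem.List.pyRange_one_eq_nil le_rfl]

lemma brkLt_succ (levels : List (List String)) (sentinel : String) (m i : Int) (hm : 0 ≤ m) :
    brkLt levels sentinel (m + 1) i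
      = (brkLt levels sentinel m i || brkCond levels sentinel i m) := by
  rw [brkLt, brkLt, PySem.List.pyRange_one_succ_right hm, List.any_append]
  simp

-- the boundary list after the first s elements of a level
def bndsOf (levels : List (List String)) (sentinel : String) (li : Int) (s : Nat) : List Int :=
  0 :: (PySem.List.pyRange 1 (s : Int) 1).filter (bBrk levels sentinel li)

lemma bnds_zero (levels : List (List String)) (sentinel : String) (li : Int) :
    bndsOf levels sentinel li 0 = [0] := by
  simp [bndsOf, PySem.List.pyRange_one_eq_nil]

lemma bnds_one (levels : List (List String)) (sentinel : String) (li : Int) :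
    bndsOf levels sentinel li 1 = [0] := by
  simp [bndsOf, PySem.List.pyRange_one_eq_nil]

lemma bnds_ne_nil (levels : List (List String)) (sentinel : String) (li : Int) (s : Nat) :
    bndsOf levels sentinel li s ≠ [] := by simp [bndsOf]

lemma bnds_succ (levels : List (List String)) (sentinel : String) (li : Int) (s : Nat)
    (hs : 1 ≤ s) :
    bndsOf levels sentinel li (s + 1)
      = bndsOf levels sentinel li s
        ++ (if bBrk levels sentinel li (s : Int) then [(s : Int)] else []) := by
  have h1 : (1 : Int) ≤ (s : Int) := by exact_mod_cast hs
  rw [bndsOf, bndsOf, show ((s + 1 : Nat) : Int) = (s : Int) + 1 by push_cast; ring,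
    PySem.List.pyRange_one_succ_right h1, List.filter_append]
  cases hb : bBrk levels sentinel li (s : Int) <;> simp [List.filter, hb]

lemma mem_bnds (levels : List (List String)) (sentinel : String) (li : Int) (s : Nat)
    (x : Int) (hx : x ∈ bndsOf levels sentinel li s) : x = 0 ∨ (1 ≤ x ∧ x < (s : Int)) := by
  rcases hx with _ | hx
  · exact Or.inl rfl
  · rename_i hx
    have := (List.mem_filter.mp hx).1
    exact Or.inr (PySem.List.mem_pyRange_one.mp this)

lemma bGaps_keys (bs : List Int) (L : Int) (h : bs ≠ []) :
    (bGaps bs L).map Prod.fst = bs := by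
  have hlen : bs.length ≤ (bs.drop 1 ++ [L]).length := by
    have := List.length_pos_iff.mpr h
    simp; omega
  simpa [bGaps, List.map_map, Function.comp] using List.map_fst_zip hlen

lemma bGaps_append (bs : List Int) (s L : Int) (h : bs ≠ []) :
    bGaps (bs ++ [s]) L = bGaps bs s ++ [(s, L - s)] := by
  obtain ⟨x, t, rfl⟩ := List.exists_cons_of_ne_nil h
  simp only [bGaps, List.cons_append, List.drop_succ_cons, List.drop_zero]
  rw [show x :: (t ++ [s]) = (x :: t) ++ [s] by simp, List.zip_append (by simp)]
  simp

lemma pyGetD_set_ne (c : List Bool) (j : Nat) (i : Int) (b d : Bool)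
    (h0 : 0 ≤ i) (hl : i < (c.length : Int)) (hne : i ≠ (j : Int)) :
    PySem.List.pyGetD (c.set j b) i d = PySem.List.pyGetD c i d := by
  rw [PySem.List.pyGetD_eq_getElem _ _ h0 (by simpa using hl),
    PySem.List.pyGetD_eq_getElem _ _ h0 hl]
  apply List.getElem_set_ne
  omega

-- A's inner loop over one level, related to the pure boundary list
lemma innerA (levels : List (List String)) (sentinel : String) (li : Int) (n0 : Nat)
    (level : List String) (hli0 : 0 ≤ li)
    (hlevel : PySem.List.pyGetD levels li [] = level) (hlen : level.length ≤ n0) :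
    ∀ (t : List String) (s : Nat) (c : List Bool) (last : Int) (d : PySem.Dict Int Int),
    t = level.drop s → s ≤ level.length → c.length = n0 →
    (∀ i : Int, 0 ≤ i → i < (s : Int) →
      PySem.List.pyGetD c i false = !(bBrk levels sentinel li i)) →
    (∀ i : Int, (s : Int) ≤ i → i < (n0 : Int) →
      PySem.List.pyGetD c i false = !(brkLt levels sentinel li i)) →
    (bndsOf levels sentinel li s).getLast? = some last →
    (∀ L : Int, (d.insert last (L - last)).items = bGaps (bndsOf levels sentinel li s) L) →
    ((PySem.List.enumerate t (s : Int)).foldl (glStepA sentinel) (c, last, d)).1.length = n0 ∧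
    (∀ i : Int, 0 ≤ i → i < (level.length : Int) →
      PySem.List.pyGetD ((PySem.List.enumerate t (s : Int)).foldl (glStepA sentinel) (c, last, d)).1 i false
        = !(bBrk levels sentinel li i)) ∧
    (∀ i : Int, (level.length : Int) ≤ i → i < (n0 : Int) →
      PySem.List.pyGetD ((PySem.List.enumerate t (s : Int)).foldl (glStepA sentinel) (c, last, d)).1 i false
        = !(brkLt levels sentinel li i)) ∧
    (∀ L : Int,
      (((PySem.List.enumerate t (s : Int)).foldl (glStepA sentinel) (c, last, d)).2.2.insert
          ((PySem.List.enumerate t (s : Int)).foldl (glStepA sentinel) (c, last, d)).2.1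
          (L - ((PySem.List.enumerate t (s : Int)).foldl (glStepA sentinel) (c, last, d)).2.1)).items
        = bGaps (bndsOf levels sentinel li level.length) L) := by
  intro t
  induction t with
  | nil =>
      intro s c last d hdrop hsle hclen hvis hunvis hlast hd
      have hse : s = level.length := by
        have := congrArg List.length hdrop
        simp [List.length_drop] at this
        omega
      subst hse
      exact ⟨hclen, hvis, hunvis, hd⟩
  | cons x t' ih =>
      intro s c last d hdrop hsle hclen hvis hunvis hlast hd
      have hslt : s < level.length := by
        have := congrArg List.length hdrop
        simp [List.length_drop] at this
        omega
      have hx : level[s]? = some x := by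
        have : (level.drop s)[0]? = some x := by rw [← hdrop]; rfl
        simpa using this
      have hdrop' : t' = level.drop (s + 1) := by
        rw [← List.drop_drop, ← hdrop]
        rfl
      have hkey : PySem.List.pyGetD level (s : Int) "" = x := by
        rw [PySem.List.pyGetD_natCast]
        simp [List.getD_eq_getElem?_getD, hx]
      have hcnd : brkCond levels sentinel (s : Int) li = !(x == sentinel) := by
        rw [brkCond, hlevel, hkey]
        simp [hslt]
      have hcs : PySem.List.pyGetD c (s : Int) false = !(brkLt levels sentinel li (s : Int)) :=
        hunvis (s : Int) le_rfl (by exact_mod_cast lt_of_lt_of_le hslt hlen)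
      have hcond : (PySem.List.pyGetD c (s : Int) false && (x == sentinel))
          = !(bBrk levels sentinel li (s : Int)) := by
        rw [hcs, bBrk_eq, brkLt_succ _ _ _ _ hli0, hcnd]
        cases brkLt levels sentinel li (s : Int) <;> cases (x == sentinel) <;> rfl
      rw [PySem.List.enumerate_cons]
      simp only [List.foldl_cons]
      by_cases hbk : bBrk levels sentinel li (s : Int) = true
      · -- break at column s
        have hcf : (PySem.List.pyGetD c ((s : Nat) : Int) false && (x == sentinel)) = false := by
          rw [hcond, hbk]; rfl
        have hstep : glStepA sentinel (c, last, d) ((s : Int), x)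
            = (c.set s false, (s : Int), d.insert last ((s : Int) - last)) := by
          simp only [glStepA, hcf, Bool.false_eq_true, if_false, Int.toNat_natCast]
        rw [hstep]
        have hcast : ((s : Int) + 1) = ((s + 1 : Nat) : Int) := by push_cast; ring
        rw [hcast]
        apply ih (s + 1) _ _ _ hdrop' (by omega) (by simpa using hclen)
        · -- visited columns
          intro i h0 hi
          by_cases hieq : i = (s : Int)
          · subst hieq
            rw [PySem.List.pyGetD_eq_getElem _ _ h0
                (by rw [List.length_set, hclen]; exact_mod_cast lt_of_lt_of_le hslt hlen)]
            simp [hbk, List.getElem_set_self]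
          · rw [pyGetD_set_ne c s i false false h0 (by rw [hclen]; push_cast at hi ⊢; omega) hieq]
            exact hvis i h0 (by push_cast at hi ⊢; omega)
        · -- unvisited columns
          intro i hi hn
          rw [pyGetD_set_ne c s i false false (by push_cast at hi; omega)
              (by rw [hclen]; exact hn) (by push_cast at hi; omega)]
          exact hunvis i (by push_cast at hi ⊢; omega) hn
        · -- last boundary
          by_cases hs0 : s = 0
          · subst hs0; rw [bnds_one]; rfl
          · rw [bnds_succ _ _ _ _ (by omega), hbk]
            simp
        · -- the dict invariant
          intro L
          by_cases hs0 : s = 0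
          · subst hs0
            have hlast0 : last = 0 := by
              rw [bnds_zero] at hlast
              simpa using hlast.symm
            subst hlast0
            rw [show ((0 : Nat) : Int) = 0 from rfl] at *
            rw [PySem.Dict.insert_insert_self, bnds_one]
            have := hd L
            rw [bnds_zero] at this
            simpa using this
          · rw [bnds_succ _ _ _ _ (by omega), hbk, if_pos rfl,
              bGaps_append _ _ _ (bnds_ne_nil _ _ _ _)]
            have hItems := hd (s : Int)
            have hcont : (d.insert last ((s : Int) - last)).contains (s : Int) = false := by
              rw [PySem.Dict.contains, PySem.Dict.items] at *
              rw [List.any_eq_false]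
              intro p hp
              have hp1 : p.1 ∈ bndsOf levels sentinel li s := by
                rw [← bGaps_keys (bndsOf levels sentinel li s) (s : Int) (bnds_ne_nil _ _ _ _),
                  ← hItems]
                exact List.mem_map_of_mem hp
              simp only [beq_iff_eq]
              intro he
              rcases mem_bnds _ _ _ _ _ (he ▸ hp1) with h1 | ⟨h1, h2⟩ <;>
                [exact absurd h1 (by exact_mod_cast hs0); omega]
            rw [← hItems, PySem.Dict.insert]
            simp [hcont]
      · -- no break: state unchanged
        have hbk' : bBrk levels sentinel li (s : Int) = false := eq_false_of_ne_true hbk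
        have hct : (PySem.List.pyGetD c ((s : Nat) : Int) false && (x == sentinel)) = true := by
          rw [hcond, hbk']; rfl
        have hstep : glStepA sentinel (c, last, d) ((s : Int), x) = (c, last, d) := by
          simp only [glStepA, hct, if_true]
        rw [hstep]
        have hcast : ((s : Int) + 1) = ((s + 1 : Nat) : Int) := by push_cast; ring
        rw [hcast]
        have hbnds : bndsOf levels sentinel li (s + 1) = bndsOf levels sentinel li s := by
          by_cases hs0 : s = 0
          · subst hs0; rw [bnds_one, bnds_zero]
          · rw [bnds_succ _ _ _ _ (by omega), hbk']
            simp
        apply ih (s + 1) _ _ _ hdrop' (by omega) hclen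
        · intro i h0 hi
          by_cases hieq : i = (s : Int)
          · subst hieq
            rw [hcs, hbk']
            have : brkLt levels sentinel li (s : Int) = false := by
              have := brkLt_succ levels sentinel li (s : Int) hli0
              rw [← bBrk_eq, hbk'] at this
              rcases Bool.or_eq_false_iff.mp this.symm with ⟨h1, _⟩
              exact h1
            rw [this]
          · exact hvis i h0 (by push_cast at hi ⊢; omega)
        · intro i hi hn
          exact hunvis i (by push_cast at hi ⊢; omega) hn
        · rw [hbnds]; exact hlast
        · rw [hbnds]; exact hd

-- A's outer loop over the levels, against B's stateless per-level map
lemma outerA (levels : List (List String)) (sentinel : String) (n0 : Nat)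
    (hpre : ∀ l ∈ levels, l.length ≤ n0) :
    ∀ (rest : List (List String)) (li : Nat) (c : List Bool)
      (acc : List (List (Int × Int))),
    rest = levels.drop li → c.length = n0 →
    (∀ i : Int, 0 ≤ i → i < (n0 : Int) →
      PySem.List.pyGetD c i false = !(brkLt levels sentinel (li : Int) i)) →
    (rest.foldl (glLevelA sentinel) (c, acc)).2
      = acc ++ (PySem.List.enumerate rest (li : Int)).map
          (fun p => bGaps (bStarts levels sentinel p.1 p.2) ((p.2.length : Int))) := by
  intro rest
  induction rest with
  | nil =>
      intro li c acc _ _ _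
      simp [PySem.List.enumerate_nil]
  | cons level rest' ih =>
      intro li c acc hdrop hclen hc
      have hli : li < levels.length := by
        by_contra h
        rw [List.drop_eq_nil_of_le (by omega)] at hdrop
        exact List.cons_ne_nil _ _ hdrop
      have hlv? : levels[li]? = some level := by
        have : (levels.drop li)[0]? = some level := by rw [← hdrop]; rfl
        simpa using this
      have hlevel : PySem.List.pyGetD levels (li : Int) [] = level := by
        rw [PySem.List.pyGetD_natCast]
        simp [List.getD_eq_getElem?_getD, hlv?]
      have hmem : level ∈ levels := by
        have : level ∈ levels.drop li := by rw [← hdrop]; exact List.mem_cons_self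
        exact List.mem_of_mem_drop this
      have hlen : level.length ≤ n0 := hpre level hmem
      have hinner := innerA levels sentinel (li : Int) n0 level (by positivity) hlevel hlen
        level 0 c 0 PySem.Dict.empty (by simp) (by omega) hclen
        (by intro i h0 hi; omega)
        (by simpa using hc)
        (by rw [bnds_zero]; rfl)
        (by
          intro L
          rw [bnds_zero]
          simp [bGaps, PySem.Dict.insert, PySem.Dict.contains, PySem.Dict.empty])
      obtain ⟨hclen', hvis', hunvis', hd'⟩ := hinner
      simp only [List.foldl_cons]
      rw [glLevelA]
      have henum0 : PySem.List.enumerate level = PySem.List.enumerate level ((0 : Nat) : Int) :=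
        rfl
      rw [henum0]
      rw [ih (li + 1) _ _
        (by rw [← List.tail_drop, ← hdrop]; rfl)
        hclen'
        (by
          intro i h0 hi
          by_cases hil : i < (level.length : Int)
          · rw [hvis' i h0 hil, bBrk_eq]
            norm_cast
          · rw [hunvis' i (by omega) hi]
            have : brkLt levels sentinel ((li : Int) + 1) i = brkLt levels sentinel (li : Int) i := by
              rw [brkLt_succ _ _ _ _ (by positivity)]
              have : brkCond levels sentinel i (li : Int) = false := by
                rw [brkCond, hlevel]
                simp only [Bool.and_eq_false_iff]
                left
                simpa using not_lt.mpr (not_lt.mp hil)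
              rw [this, Bool.or_false]
            rw [show ((li + 1 : Nat) : Int) = (li : Int) + 1 by push_cast; ring, this])]
      rw [PySem.List.enumerate_cons]
      simp only [List.map_cons]
      rw [hd' ((level.length : Int))]
      have hbs : bndsOf levels sentinel (li : Int) level.length
          = bStarts levels sentinel (li : Int) level := rfl
      rw [hbs, show ((li : Int) + 1) = ((li + 1 : Nat) : Int) by push_cast; ring]
      simp

-- ===== VERDICT (by name: the statement is the Claim_ definition above) =====
theorem get_level_lengths_spec : Claim_equal_get_level_lengths := by
  intro levels sentinel _ hpre
  unfold Spec_get_level_lengths get_level_lengths get_level_lengths_alt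
  by_cases hnil : levels.length = 0
  · simp [hnil]
  · simp only [hnil, beq_iff_eq, if_false]
    have h0 := outerA levels sentinel (levels.headD []).length hpre levels 0
      ((levels.headD []).map (fun _ => true)) [] (by simp) (by simp)
      (by
        intro i h0 hi
        rw [show ((0 : Nat) : Int) = 0 from rfl, brkLt_zero]
        rw [PySem.List.pyGetD_eq_getElem _ _ h0 (by simpa using hi)]
        simp)
    rw [show levels = levels.drop 0 from rfl] at h0
    simpa using h0
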